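-- pv_equiv track=rewrite | github.com/dtgoitia/connect-z | create_game.py | move_generator
-- ===== SOURCE A (Python) =====
-- import math
--
-- def move_generator(columns: int, rows: int, line_length: int):
--     if line_length < 3:
--         raise ValueError(f'line length must be 3 or bigger')
--
--     # columns: 1 2 3 4     move sequence:
--     # row 1:   A A B B     1 3 2 4
--     # row 2:   B B A A     6 8 5 7
--     basic_block = [1, 3, 2, 4, 3, 1, 4, 2]
--     block_length = 4
--     block_height = 2
--
--     # how many basic blocks fit in the board considering the column amount
--     h_size = math.floor(columns / block_length)
--
--     # how many basic blocks fit in the board considering the row amount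
--     v_size = math.floor(rows / block_height)
--
--     def block_generator(start_column: int):
--         relocated_block = (column + start_column for column in basic_block)
--         return relocated_block
--
--     start_columns = range(0, columns - block_length + 1, block_length)
--     start_rows = range(0, rows - block_height + 1, block_height)
--
--     for start_row in start_rows:
--         for start_column in start_columns:
--             for move in block_generator(start_column):
--                 yield move
-- ===== SOURCE B (Python) =====
-- def move_generator(columns: int, rows: int, line_length: int):
--     # Index-arithmetic closed form: the total number of moves is computed up
--     # front and the k-th move is derived directly from k, with no nested
--     # row/column loops at all.
--     if line_length < 3:
--         raise ValueError('line length must be 3 or bigger')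
--     basic_block = [1, 3, 2, 4, 3, 1, 4, 2]
--     blocks_per_row = max(0, columns // 4)
--     block_rows = max(0, rows // 2)
--     total = 8 * blocks_per_row * block_rows
--     for k in range(total):
--         yield basic_block[k % 8] + 4 * ((k // 8) % blocks_per_row)
-- ===== Notes on version B (the rewrite author's own statement) =====
-- stated objective: alternative
-- what changed: Replaces A's three nested loops (rows x blocks x block cells) by an index-arithmetic closed form: the total move count 8*max(0,columns//4)*max(0,rows//2) is computed up front and the k-th move is derived directly from k as basic_block[k%8] + 4*((k//8)%blocks_per_row); Pre_ excludes line_length < 3, where A raises ValueError.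
import Mathlib
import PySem

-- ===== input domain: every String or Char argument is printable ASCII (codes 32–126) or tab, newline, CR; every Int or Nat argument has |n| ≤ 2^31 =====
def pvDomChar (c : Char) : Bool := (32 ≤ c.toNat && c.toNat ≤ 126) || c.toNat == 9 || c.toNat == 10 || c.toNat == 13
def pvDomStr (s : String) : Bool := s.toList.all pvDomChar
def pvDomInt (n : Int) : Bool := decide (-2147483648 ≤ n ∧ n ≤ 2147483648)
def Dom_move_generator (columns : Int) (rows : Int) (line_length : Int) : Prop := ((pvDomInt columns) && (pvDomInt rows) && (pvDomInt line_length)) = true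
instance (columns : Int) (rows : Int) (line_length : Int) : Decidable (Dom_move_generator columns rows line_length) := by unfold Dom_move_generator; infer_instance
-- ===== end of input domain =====

-- B replaces A's three nested loops by an index-arithmetic closed form: the total move
-- count is computed up front and the k-th move is derived directly from k (objective: alternative).


-- ===== PORT A =====
-- Literal port of A's generator: the nested for-loops accumulate the yielded moves in order.
-- h_size / v_size are computed by A but never used (dead values), so they are not ported.
def move_generator (columns : Int) (rows : Int) (line_length : Int) : List Int :=
  if line_length < 3 then []   -- A raises ValueError here; excluded by Pre_
  else
    let basic_block : List Int := [1, 3, 2, 4, 3, 1, 4, 2]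
    let start_columns := PySem.List.pyRange 0 (columns - 4 + 1) 4
    let start_rows := PySem.List.pyRange 0 (rows - 2 + 1) 2
    start_rows.foldl (fun acc _start_row =>
      start_columns.foldl (fun acc2 start_column =>
        acc2 ++ basic_block.map (fun column => column + start_column)) acc) []

-- ===== PORT B =====
-- Literal port of B: total count up front, then one flat loop deriving move k from k.
-- basic_block[k % 8] always has 0 ≤ k % 8 < 8, so the lookup never leaves the list (getD 0 is never reached).
def move_generator_alt (columns : Int) (rows : Int) (line_length : Int) : List Int :=
  if line_length < 3 then []   -- B raises ValueError here; excluded by Pre_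
  else
    let basic_block : List Int := [1, 3, 2, 4, 3, 1, 4, 2]
    let blocks_per_row := max 0 (PySem.Int.floordiv columns 4)
    let block_rows := max 0 (PySem.Int.floordiv rows 2)
    let total := 8 * blocks_per_row * block_rows
    (PySem.List.pyRange 0 total 1).map (fun k =>
      (PySem.List.pyGet? basic_block (PySem.Int.mod k 8)).getD 0
        + 4 * (PySem.Int.mod (PySem.Int.floordiv k 8) blocks_per_row))

-- ===== PRECONDITION & SPEC =====
-- A raises ValueError when line_length < 3; Pre_ admits exactly the inputs where A returns.
def Pre_move_generator (columns : Int) (rows : Int) (line_length : Int) : Prop := 3 ≤ line_length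
instance (columns : Int) (rows : Int) (line_length : Int) : Decidable (Pre_move_generator columns rows line_length) := by unfold Pre_move_generator; infer_instance
def pvWitness_move_generator : Int × Int × Int := (8, 4, 3)

def Spec_move_generator (columns : Int) (rows : Int) (line_length : Int) (out : List Int) : Prop := out = move_generator_alt columns rows line_length
instance (columns : Int) (rows : Int) (line_length : Int) (out : List Int) : Decidable (Spec_move_generator columns rows line_length out) := by unfold Spec_move_generator; infer_instance

-- ===== CLAIM (what is proved, stated in full; the proofs are below) =====
def Claim_equal_move_generator : Prop := ∀ (columns : Int) (rows : Int) (line_length : Int), Dom_move_generator columns rows line_length → Pre_move_generator columns rows line_length → Spec_move_generator columns rows line_length (move_generator columns rows line_length)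

-- ===== LEMMAS AND PROOFS =====

-- Canonical intermediate form both ports are reduced to: one row of moves, repeated.
def pvRow (N : Nat) : List Int :=
  (List.range N).flatMap (fun b : Nat => ([1, 3, 2, 4, 3, 1, 4, 2] : List Int).map (fun c => c + 4 * (b : Int)))

def pvRepeat (c : List Int) : Nat → List Int
  | 0 => []
  | R + 1 => c ++ pvRepeat c R

-- B's per-index move function, on the Nat side (with the modulus N), and without it.
def pvG (N k : Nat) : Int :=
  (([1, 3, 2, 4, 3, 1, 4, 2] : List Int)[k % 8]?).getD 0 + 4 * (((k / 8) % N : Nat) : Int)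

def pvGi (k : Nat) : Int :=
  (([1, 3, 2, 4, 3, 1, 4, 2] : List Int)[k % 8]?).getD 0 + 4 * ((k / 8 : Nat) : Int)

theorem pvG_shift (N j : Nat) : pvG N (8 * N + j) = pvG N j := by
  have h1 : (8 * N + j) % 8 = j % 8 := by omega
  have h2 : (8 * N + j) / 8 = N + j / 8 := by omega
  simp [pvG, h1, h2, Nat.add_mod_left]

theorem pvChunk (n : Nat) : (List.range (8 * n)).map pvGi = pvRow n := by
  induction n with
  | zero => simp [pvRow]
  | succ n ih =>
    have e : ∀ t, t < 8 → pvGi (8 * n + t)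
        = (([1, 3, 2, 4, 3, 1, 4, 2] : List Int)[t]?).getD 0 + 4 * (n : Int) := by
      intro t ht
      have h1 : (8 * n + t) % 8 = t := by omega
      have h2 : (8 * n + t) / 8 = n := by omega
      simp [pvGi, h1, h2]
    rw [show 8 * (n + 1) = 8 * n + 8 by ring, List.range_add, List.map_append, List.map_map]
    rw [show List.range 8 = [0, 1, 2, 3, 4, 5, 6, 7] from rfl]
    simp only [List.map_cons, List.map_nil, Function.comp]
    rw [e 0 (by norm_num), e 1 (by norm_num), e 2 (by norm_num), e 3 (by norm_num),
        e 4 (by norm_num), e 5 (by norm_num), e 6 (by norm_num), e 7 (by norm_num)]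
    simp [pvRow, List.range_succ, ih]

theorem pvRows (N R : Nat) : (List.range (8 * N * R)).map (pvG N) = pvRepeat (pvRow N) R := by
  induction R with
  | zero => simp [pvRepeat]
  | succ R ih =>
    rw [show 8 * N * (R + 1) = 8 * N + 8 * N * R by ring, List.range_add, List.map_append,
        List.map_map]
    have hfirst : (List.range (8 * N)).map (pvG N) = (List.range (8 * N)).map pvGi := by
      apply List.map_congr_left
      intro k hk
      have hk' : k < 8 * N := List.mem_range.mp hk
      have hdiv : k / 8 < N := by omega
      simp [pvG, pvGi, Nat.mod_eq_of_lt hdiv]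
    have hshift : (List.range (8 * N * R)).map (pvG N ∘ (fun x => 8 * N + x))
        = (List.range (8 * N * R)).map (pvG N) := by
      apply List.map_congr_left
      intro k _
      exact pvG_shift N k
    rw [hfirst, pvChunk, hshift, ih]
    rfl

theorem pvFlatMapConst {α : Type} (c : List Int) (l : List α) :
    l.flatMap (fun _ => c) = pvRepeat c l.length := by
  induction l with
  | nil => rfl
  | cons x xs ih => simp [List.flatMap_cons, ih, pvRepeat]

theorem move_generator_spec : Claim_equal_move_generator := by
  intro columns rows line_length _hdom hpre
  unfold Spec_move_generator move_generator move_generator_alt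
  have h3 : ¬ line_length < 3 := not_lt.mpr hpre
  simp only [if_neg h3]
  set N : Nat := (max 0 (PySem.Int.floordiv columns 4)).toNat with hN
  set R : Nat := (max 0 (PySem.Int.floordiv rows 2)).toNat with hR
  have hNc : max 0 (PySem.Int.floordiv columns 4) = (N : Int) := by
    rw [hN, Int.toNat_of_nonneg (le_max_left 0 _)]
  have hRc : max 0 (PySem.Int.floordiv rows 2) = (R : Int) := by
    rw [hR, Int.toNat_of_nonneg (le_max_left 0 _)]
  -- ===== A-side: reduce the nested foldls to pvRepeat (pvRow N) R =====
  have hA : (PySem.List.pyRange 0 (rows - 2 + 1) 2).foldl (fun acc _ =>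
        (PySem.List.pyRange 0 (columns - 4 + 1) 4).foldl (fun acc2 start_column =>
          acc2 ++ ([1, 3, 2, 4, 3, 1, 4, 2] : List Int).map (fun column => column + start_column)) acc) []
      = pvRepeat (pvRow N) R := by
    simp only [PySem.List.foldl_append_eq_flatMap, List.nil_append]
    rw [PySem.List.pyRange_of_pos 0 (columns - 4 + 1) (by norm_num),
        PySem.List.pyRange_of_pos 0 (rows - 2 + 1) (by norm_num)]
    have hc : (if (0:Int) < columns - 4 + 1 then ((columns - 4 + 1 - 0 + 4 - 1) / 4).toNat else 0) = N := by
      rw [hN, PySem.Int.floordiv_eq_ediv_of_pos (by norm_num : (0:Int) < 4)]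
      split_ifs with h <;> omega
    have hr : (if (0:Int) < rows - 2 + 1 then ((rows - 2 + 1 - 0 + 2 - 1) / 2).toNat else 0) = R := by
      rw [hR, PySem.Int.floordiv_eq_ediv_of_pos (by norm_num : (0:Int) < 2)]
      split_ifs with h <;> omega
    rw [hc, hr]
    rw [List.flatMap_map, List.flatMap_map]
    have hrow : (List.range N).flatMap (fun k : Nat =>
        ([1, 3, 2, 4, 3, 1, 4, 2] : List Int).map (fun column => column + ((0:Int) + 4 * k))) = pvRow N := by
      unfold pvRow
      apply List.flatMap_congr
      intro k _
      simp [mul_comm]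
    rw [hrow]
    rw [pvFlatMapConst (pvRow N) (List.range R)]
    simp
  rw [hA]
  -- ===== B-side: reduce the single map over range(total) to pvRepeat (pvRow N) R =====
  rw [hNc, hRc, PySem.List.pyRange_one 0 (8 * (N : Int) * (R : Int)), List.map_map]
  have htot : ((8 : Int) * (N : Int) * (R : Int) - 0).toNat = 8 * N * R := by
    rw [sub_zero, show (8:Int) * N * R = ((8 * N * R : Nat) : Int) by push_cast; ring,
        Int.toNat_natCast]
  rw [htot]
  have helem : ∀ k ∈ List.range (8 * N * R),
      ((fun x : Int => (PySem.List.pyGet? ([1, 3, 2, 4, 3, 1, 4, 2] : List Int) (PySem.Int.mod x 8)).getD 0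
        + 4 * (PySem.Int.mod (PySem.Int.floordiv x 8) (N : Int))) ∘ (fun k : Nat => (0:Int) + k)) k
      = pvG N k := by
    intro k _
    simp only [Function.comp, zero_add]
    have hm8 : PySem.Int.mod (k : Int) 8 = ((k % 8 : Nat) : Int) := by
      exact_mod_cast PySem.Int.mod_natCast k 8
    have hd8 : PySem.Int.floordiv (k : Int) 8 = ((k / 8 : Nat) : Int) := by
      exact_mod_cast PySem.Int.floordiv_natCast k 8
    rw [hm8, hd8, PySem.Int.mod_natCast (k / 8) N, PySem.List.pyGet?_natCast]
    rfl
  rw [List.map_congr_left helem, pvRows]
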